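-- pv_equiv track=rewrite | github.com/oleast/snippets | tdt4117/e3/functions.py | remove_punctuations_in_list
-- ===== SOURCE A (Python) =====
-- import string
--
-- def remove_punctuations_in_list(word_list):
--
--     # This method iterates over an array of strings, removing all puctuation.
--     # It then returns the array.
--
--     words = []
--     for word in word_list:
--         w = ""
--         for letter in word:
--             if (string.punctuation + "\n\r\t").__contains__(letter):
--                 if w != "":
--                     words.append(w.lower())
--                     w = ""
--                 continue
--             w += letter
--         if w != "":
--             words.append(w.lower())
--     return words
-- ===== SOURCE B (Python) =====
-- import re
-- import string
--
-- _SEPS = string.punctuation + "\n\r\t"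
-- _TOKEN = re.compile(r'[^' + re.escape(_SEPS) + r']+')
--
-- def remove_punctuations_in_list(word_list):
--     # Regex extraction of maximal non-separator runs, replacing the manual
--     # buffer/flush state machine.
--     return [tok.lower() for word in word_list for tok in _TOKEN.findall(word)]
-- ===== Notes on version B (the rewrite author's own statement) =====
-- stated objective: idiomatic
-- what changed: Replaces the hand-rolled character buffer/flush state machine with a compiled regex character class that extracts maximal runs of non-separator characters per word, flattened by a comprehension.
import Mathlib
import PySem

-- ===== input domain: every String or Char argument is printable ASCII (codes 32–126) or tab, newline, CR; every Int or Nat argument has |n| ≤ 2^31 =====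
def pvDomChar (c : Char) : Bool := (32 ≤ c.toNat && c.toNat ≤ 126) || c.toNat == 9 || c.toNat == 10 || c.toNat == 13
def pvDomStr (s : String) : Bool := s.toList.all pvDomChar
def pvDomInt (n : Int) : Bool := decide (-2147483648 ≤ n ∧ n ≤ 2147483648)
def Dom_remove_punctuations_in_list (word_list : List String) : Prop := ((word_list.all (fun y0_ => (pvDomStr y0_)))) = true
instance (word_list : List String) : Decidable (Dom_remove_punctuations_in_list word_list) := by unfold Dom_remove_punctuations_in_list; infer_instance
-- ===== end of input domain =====

-- B replaces A's per-character buffer/flush state machine with regex-style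
-- extraction of maximal non-separator runs per word (idiomatic; same cost).

-- string.punctuation + "\n\r\t" (shared separator class of both Pythons)
def pvSep (c : Char) : Bool := ("!\"#$%&'()*+,-./:;<=>?@[\\]^_`{|}~\n\r\t".toList).contains c

-- tok.lower() on a character buffer
def pvLower (cs : List Char) : String := PySem.Str.lower (String.mk cs)

-- ===== PORT A =====
-- inner 'for letter in word' loop: state = (words so far, current buffer w)
def pvAStep (p : List String × List Char) (letter : Char) : List String × List Char :=
  if pvSep letter then (if p.2 = [] then p else (p.1 ++ [pvLower p.2], [])) else (p.1, p.2 ++ [letter])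

-- one iteration of 'for word in word_list': run the inner loop, then flush w
def pvAWord (words : List String) (word : String) : List String :=
  let r := word.toList.foldl pvAStep (words, [])
  if r.2 = [] then r.1 else r.1 ++ [pvLower r.2]

def remove_punctuations_in_list (word_list : List String) : List String :=
  word_list.foldl pvAWord []

-- ===== PORT B =====
-- findall(r'[^sep]+', word): maximal runs of non-separator chars, via a right fold
-- carrying (current leading run, runs already finished)
def pvRunStep (c : Char) (p : List Char × List (List Char)) : List Char × List (List Char) :=
  if pvSep c then ([], if p.1 = [] then p.2 else p.1 :: p.2) else (c :: p.1, p.2)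

def pvRuns (cs : List Char) : List (List Char) :=
  let r := cs.foldr pvRunStep ([], [])
  if r.1 = [] then r.2 else r.1 :: r.2

def remove_punctuations_in_list_alt (word_list : List String) : List String :=
  word_list.flatMap (fun word => (pvRuns word.toList).map pvLower)

-- ===== PRECONDITION & SPEC =====
def Spec_remove_punctuations_in_list (word_list : List String) (out : List String) : Prop := out = remove_punctuations_in_list_alt word_list
instance (word_list : List String) (out : List String) : Decidable (Spec_remove_punctuations_in_list word_list out) := by unfold Spec_remove_punctuations_in_list; infer_instance

-- ===== CLAIM (what is proved, stated in full; the proofs are below) =====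
def Claim_equal_remove_punctuations_in_list : Prop := ∀ (word_list : List String), Dom_remove_punctuations_in_list word_list → Spec_remove_punctuations_in_list word_list (remove_punctuations_in_list word_list)

-- ===== LEMMAS AND PROOFS =====

-- left-to-right specification of the tokens of a word, given a pending buffer b
def pvTok (b : List Char) : List Char → List (List Char)
  | [] => if b = [] then [] else [b]
  | c :: cs => if pvSep c then (if b = [] then pvTok [] cs else b :: pvTok [] cs)
               else pvTok (b ++ [c]) cs

-- A's inner loop (with flush) appends exactly the lowered pvTok tokens
theorem pvAWord_eq_tok (w : List Char) : ∀ (b : List Char) (acc : List String),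
    (let r := w.foldl pvAStep (acc, b)
     if r.2 = [] then r.1 else r.1 ++ [pvLower r.2]) = acc ++ (pvTok b w).map pvLower := by
  induction w with
  | nil => intro b acc; by_cases hb : b = [] <;> simp [pvTok, hb]
  | cons c cs ih =>
    intro b acc
    by_cases hc : pvSep c
    · by_cases hb : b = []
      · simpa [List.foldl_cons, pvAStep, pvTok, hc, hb] using ih [] acc
      · simpa [List.foldl_cons, pvAStep, pvTok, hc, hb] using ih [] (acc ++ [pvLower b])
    · simpa [List.foldl_cons, pvAStep, pvTok, hc] using ih (b ++ [c]) acc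

-- pvRuns computes pvTok with empty starting buffer
theorem pvTok_eq_runs_aux (w : List Char) : ∀ (b : List Char),
    pvTok b w =
      (if b ++ (w.foldr pvRunStep ([], [])).1 = [] then (w.foldr pvRunStep ([], [])).2
       else (b ++ (w.foldr pvRunStep ([], [])).1) :: (w.foldr pvRunStep ([], [])).2) := by
  induction w with
  | nil => intro b; by_cases hb : b = [] <;> simp [pvTok, hb]
  | cons c cs ih =>
    intro b
    by_cases hc : pvSep c
    · by_cases hb : b = [] <;>
        simp [pvTok, List.foldr_cons, pvRunStep, hc, hb, ih]
    · have := ih (b ++ [c])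
      simp [pvTok, List.foldr_cons, pvRunStep, hc, this, List.append_assoc]

theorem pvTok_eq_runs (w : List Char) : pvTok [] w = pvRuns w := by
  simpa [pvRuns] using pvTok_eq_runs_aux w []

-- the outer loop over word_list equals the flatMap, for any accumulator
theorem pvOuter (wl : List String) : ∀ (acc : List String),
    wl.foldl pvAWord acc = acc ++ wl.flatMap (fun word => (pvRuns word.toList).map pvLower) := by
  induction wl with
  | nil => intro acc; simp
  | cons w ws ih =>
    intro acc
    have h1 : pvAWord acc w = acc ++ (pvRuns w.toList).map pvLower := by
      simpa [pvAWord, pvTok_eq_runs] using pvAWord_eq_tok w.toList [] acc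
    simp [List.foldl_cons, ih, h1, List.flatMap_cons, List.append_assoc]

-- ===== VERDICT (by name: the statement is the Claim_ definition above) =====
theorem remove_punctuations_in_list_spec : Claim_equal_remove_punctuations_in_list := by
  intro wl _
  unfold Spec_remove_punctuations_in_list remove_punctuations_in_list remove_punctuations_in_list_alt
  simpa using pvOuter wl []
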